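-- pv_equiv track=rewrite | github.com/fcbyk/fcbyk-cli | src/fcbykcli/plugins/lansend/service.py | get_path_parts
-- ===== SOURCE A (Python) =====
-- def get_path_parts(current_path: str) -> list[dict[str, str]]:
--     """把相对路径拆成面包屑。
--
--     注意：这里必须统一使用 URL 风格的 "/" 分隔符。
--     在 Windows 上如果用 os.path.join，会生成 "\\"，从而导致前端面包屑拼接/跳转异常。
--     """
--     parts: list[dict[str, str]] = []
--     if current_path:
--         path_parts = current_path.split("/")
--         current = ""
--         for part in path_parts:
--             if part:
--                 # 强制使用 "/" 作为分隔符，避免 Windows 反斜杠污染 API 返回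
--                 current = f"{current}/{part}" if current else part
--                 parts.append({"name": part, "path": current})
--     return parts
-- ===== SOURCE B (Python) =====
-- def get_path_parts(current_path: str) -> list[dict[str, str]]:
--     segs = [p for p in current_path.split("/") if p]
--     return [{"name": p, "path": "/".join(segs[:i + 1])} for i, p in enumerate(segs)]
-- ===== Notes on version B (the rewrite author's own statement) =====
-- stated objective: simpler
-- what changed: B first builds the cleaned segment list, then maps each segment to its breadcrumb, recomputing each cumulative path as a prefix-slice join instead of threading a running accumulator string and an output list through a loop with an emptiness branch.
import Mathlib
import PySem

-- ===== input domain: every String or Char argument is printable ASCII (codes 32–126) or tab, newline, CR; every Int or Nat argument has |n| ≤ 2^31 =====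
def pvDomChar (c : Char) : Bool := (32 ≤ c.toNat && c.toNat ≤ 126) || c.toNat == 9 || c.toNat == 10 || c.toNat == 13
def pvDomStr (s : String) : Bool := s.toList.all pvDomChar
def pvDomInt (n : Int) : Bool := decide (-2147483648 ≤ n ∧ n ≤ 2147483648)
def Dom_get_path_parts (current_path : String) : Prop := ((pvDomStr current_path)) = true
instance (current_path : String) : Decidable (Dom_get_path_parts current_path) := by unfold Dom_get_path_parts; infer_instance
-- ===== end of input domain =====

-- B replaces A's accumulator loop by a map over the cleaned segment list, recomputing each
-- cumulative path as a prefix-slice join (objective: simpler decomposition; same cost).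

-- str.split(sep) for a nonempty literal separator, exact via PySem.Chars.splitOn
def pvSplit (s sep : String) : List String :=
  (PySem.Chars.splitOn s.toList sep.toList).map String.ofList

-- ===== PORT A =====
-- the 'for part in path_parts' loop of A, threading (current, parts)
def aLoop : List String → String → List (List (String × String)) → List (List (String × String))
  | [], _, acc => acc
  | part :: rest, cur, acc =>
    if part ≠ "" then
      let cur' := if cur ≠ "" then cur ++ "/" ++ part else part
      aLoop rest cur' (acc ++ [[("name", part), ("path", cur')]])
    else
      aLoop rest cur acc

def get_path_parts (current_path : String) : List (List (String × String)) :=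
  if current_path ≠ "" then aLoop (pvSplit current_path "/") "" [] else []

-- ===== PORT B =====
def get_path_parts_alt (current_path : String) : List (List (String × String)) :=
  let segs := (pvSplit current_path "/").filter (fun p => p ≠ "")
  (PySem.List.enumerate segs).map
    (fun ip => [("name", ip.2),
                ("path", PySem.Str.join "/" (PySem.List.slice segs none (some (ip.1 + 1))))])

-- ===== PRECONDITION & SPEC =====
def Spec_get_path_parts (current_path : String) (out : List (List (String × String))) : Prop := out = get_path_parts_alt current_path
instance (current_path : String) (out : List (List (String × String))) : Decidable (Spec_get_path_parts current_path out) := by unfold Spec_get_path_parts; infer_instance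

-- ===== CLAIM (what is proved, stated in full; the proofs are below) =====
def Claim_equal_get_path_parts : Prop := ∀ (current_path : String), Dom_get_path_parts current_path → Spec_get_path_parts current_path (get_path_parts current_path)

-- ===== LEMMAS AND PROOFS =====

-- common recursive characterisation: breadcrumbs of `l` after the already-joined prefix `pre`
def crumbs (pre : List String) : List String → List (List (String × String))
  | [] => []
  | p :: rest =>
      [("name", p), ("path", PySem.Str.join "/" (pre ++ [p]))] :: crumbs (pre ++ [p]) rest

theorem toList_ne_nil_of_ne (s : String) (h : s ≠ "") : s.toList ≠ [] := by
  intro h2; exact h (String.toList_inj.mp (by simp [h2]))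

theorem join_ne_empty (pre : List String) (hne : pre ≠ [])
    (hpre : ∀ p ∈ pre, p ≠ "") : PySem.Str.join "/" pre ≠ "" := by
  intro h
  have h' := congrArg String.toList h
  rw [PySem.Str.toList_join] at h'
  simp only [String.toList_empty] at h'
  match pre, hne with
  | [a], _ =>
    rw [List.map_cons, List.map_nil, PySem.Chars.join_singleton] at h'
    exact toList_ne_nil_of_ne a (hpre a (by simp)) h'
  | a :: b :: r, _ =>
    rw [List.map_cons, List.map_cons, PySem.Chars.join_cons_cons] at h'
    simp at h' 

theorem chars_join_append_singleton (sep x : List Char) (l : List (List Char)) (h : l ≠ []) :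
    PySem.Chars.join sep (l ++ [x]) = PySem.Chars.join sep l ++ sep ++ x := by
  induction l with
  | nil => exact absurd rfl h
  | cons a r ih =>
    cases r with
    | nil => simp [PySem.Chars.join_cons_cons, PySem.Chars.join_singleton]
    | cons b r' =>
      rw [List.cons_append, List.cons_append, PySem.Chars.join_cons_cons,
        ← List.cons_append, ih (by simp), PySem.Chars.join_cons_cons]
      simp

theorem join_append_singleton (x : String) (pre : List String) (h : pre ≠ []) :
    PySem.Str.join "/" (pre ++ [x]) = PySem.Str.join "/" pre ++ "/" ++ x := by
  apply String.toList_inj.mp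
  rw [PySem.Str.toList_join]
  simp only [String.toList_append, PySem.Str.toList_join, List.map_append, List.map_cons,
    List.map_nil]
  exact chars_join_append_singleton _ _ _ (by simpa using h)

theorem join_singleton_str (x : String) : PySem.Str.join "/" [x] = x := by
  apply String.toList_inj.mp
  rw [PySem.Str.toList_join]
  simp [PySem.Chars.join_singleton]

theorem join_nil_str : PySem.Str.join "/" ([] : List String) = "" := by
  apply String.toList_inj.mp
  rw [PySem.Str.toList_join]
  simp [PySem.Chars.join_nil]

theorem aLoop_eq (parts : List String) : ∀ (pre : List String)
    (acc : List (List (String × String))), (∀ p ∈ pre, p ≠ "") →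
    aLoop parts (PySem.Str.join "/" pre) acc
      = acc ++ crumbs pre (parts.filter (fun p => p ≠ "")) := by
  induction parts with
  | nil => intro pre acc _; simp [aLoop, crumbs]
  | cons part rest ih =>
    intro pre acc hpre
    by_cases hp : part = ""
    · subst hp
      simp only [aLoop, ne_eq, not_true_eq_false, if_false, List.filter_cons]
      simpa using ih pre acc hpre
    · have hcur' : (if PySem.Str.join "/" pre ≠ "" then PySem.Str.join "/" pre ++ "/" ++ part
          else part) = PySem.Str.join "/" (pre ++ [part]) := by
        by_cases hpre0 : pre = []
        · subst hpre0
          simp [join_nil_str, join_singleton_str]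
        · rw [if_pos (join_ne_empty pre hpre0 hpre), join_append_singleton part pre hpre0]
      have hpre' : ∀ p ∈ pre ++ [part], p ≠ "" := by
        intro p hmem
        rcases List.mem_append.mp hmem with h | h
        · exact hpre p h
        · simp at h; subst h; exact hp
      simp only [aLoop, ne_eq, hp, not_false_eq_true, if_true, hcur']
      rw [ih (pre ++ [part]) _ hpre']
      simp [hp, crumbs]

theorem bmap_eq (segs : List String) : ∀ (pre : List String),
    (PySem.List.enumerate segs (pre.length : Int)).map
      (fun ip => [("name", ip.2),
        ("path", PySem.Str.join "/" (PySem.List.slice (pre ++ segs) none (some (ip.1 + 1))))])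
      = crumbs pre segs := by
  induction segs with
  | nil => intro pre; simp [PySem.List.enumerate_nil, crumbs]
  | cons p rest ih =>
    intro pre
    rw [PySem.List.enumerate_cons, List.map_cons, crumbs]
    have hs : PySem.List.slice (pre ++ p :: rest) none (some ((pre.length : Int) + 1))
        = pre ++ [p] := by
      rw [show ((pre.length : Int) + 1) = ((pre.length + 1 : Nat) : Int) by push_cast; ring,
        PySem.List.slice_to _ (by positivity), Int.toNat_natCast, List.take_append]
      simp
    congr 1
    · simp [hs]
    · have hlen : (pre.length : Int) + 1 = ((pre ++ [p]).length : Int) := by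
        simp
      have hl : pre ++ p :: rest = (pre ++ [p]) ++ rest := by simp
      rw [hlen, hl]
      exact ih (pre ++ [p])

-- ===== VERDICT (by name: the statement is the Claim_ definition above) =====
theorem get_path_parts_spec : Claim_equal_get_path_parts := by
  intro current_path _
  unfold Spec_get_path_parts
  by_cases h : current_path = ""
  · subst h; decide
  · unfold get_path_parts get_path_parts_alt
    rw [if_pos h]
    have hA := aLoop_eq (pvSplit current_path "/") [] [] (by simp)
    rw [join_nil_str] at hA
    rw [hA]
    have hB := bmap_eq ((pvSplit current_path "/").filter (fun p => p ≠ "")) []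
    simp only [List.length_nil, Nat.cast_zero, List.nil_append] at hB
    simp only [List.nil_append]
    exact hB.symm
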